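-- pv_equiv track=rewrite | github.com/kiipo0623/Algorithm-2021 | 1120/number124.py | solution
-- ===== SOURCE A (Python) =====
-- def solution(n):
--     answer = ''
--     while n > 0:
--         nanu = n%3
--         if nanu == 1:
--             answer = '1' + answer
--         elif nanu == 2:
--             answer = '2' + answer
--         elif nanu == 0:
--             answer = '4' + answer
--         n = n//3
--     return answer
-- ===== SOURCE B (Python) =====
-- def solution(n):
--     if n <= 0:
--         return ''
--     return solution(n // 3) + '412'[n % 3]
-- ===== Notes on version B (the rewrite author's own statement) =====
-- stated objective: simpler
-- what changed: Replaces the while-loop with a string-prepend accumulator by a direct recursion that appends the least-significant digit (looked up in the table '412') on the way back.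
import Mathlib
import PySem

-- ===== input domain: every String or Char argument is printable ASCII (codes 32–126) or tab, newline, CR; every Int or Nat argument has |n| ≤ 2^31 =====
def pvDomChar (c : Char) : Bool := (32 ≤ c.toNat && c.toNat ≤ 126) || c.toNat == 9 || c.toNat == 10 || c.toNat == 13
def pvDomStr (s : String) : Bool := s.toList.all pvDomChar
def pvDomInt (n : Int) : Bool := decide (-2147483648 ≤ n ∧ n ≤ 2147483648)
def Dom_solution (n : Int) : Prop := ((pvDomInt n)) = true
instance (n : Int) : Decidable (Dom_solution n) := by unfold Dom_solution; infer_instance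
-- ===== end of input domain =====

-- B replaces A's while-loop with a prepend accumulator by a direct recursion
-- appending the least-significant digit (table lookup '412'[n % 3]) on the way back; objective: simpler.

-- ===== PORT A =====
-- the while-loop of A, state (n, answer)
def solutionLoop (n : Int) (answer : String) : String :=
  if h : n > 0 then
    let nanu := PySem.Int.mod n 3
    let answer' :=
      if nanu = 1 then "1" ++ answer
      else if nanu = 2 then "2" ++ answer
      else if nanu = 0 then "4" ++ answer
      else answer
    solutionLoop (PySem.Int.floordiv n 3) answer'
  else answer
termination_by n.toNat
decreasing_by
  rw [PySem.Int.floordiv_eq_ediv_of_pos (by omega)]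
  omega

def solution (n : Int) : String := solutionLoop n ""

-- ===== PORT B =====
-- '412'[n % 3]: index is always in range (0 ≤ n%3 < 3), so the none branch is unreachable; exact port of the indexing
def solution_alt (n : Int) : String :=
  if h : n ≤ 0 then ""
  else
    solution_alt (PySem.Int.floordiv n 3) ++
      (match PySem.Str.pyGet? "412" (PySem.Int.mod n 3) with
       | some c => String.singleton c
       | none => "")
termination_by n.toNat
decreasing_by
  rw [PySem.Int.floordiv_eq_ediv_of_pos (by omega)]
  omega

-- ===== PRECONDITION & SPEC =====
def Spec_solution (n : Int) (out : String) : Prop := out = solution_alt n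
instance (n : Int) (out : String) : Decidable (Spec_solution n out) := by unfold Spec_solution; infer_instance

-- ===== CLAIM (what is proved, stated in full; the proofs are below) =====
def Claim_equal_solution : Prop := ∀ (n : Int), Dom_solution n → Spec_solution n (solution n)

-- ===== LEMMAS AND PROOFS =====

theorem loop_eq_alt (k : Nat) : ∀ (n : Int) (acc : String),
    n.toNat ≤ k → solutionLoop n acc = solution_alt n ++ acc := by
  induction k with
  | zero =>
    intro n acc h
    rw [solutionLoop, solution_alt]
    rw [dif_neg (by omega : ¬ n > 0), dif_pos (by omega : n ≤ 0)]
    rfl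
  | succ k ih =>
    intro n acc h
    by_cases hn : n > 0
    · have hd : (PySem.Int.floordiv n 3).toNat ≤ k := by
        rw [PySem.Int.floordiv_eq_ediv_of_pos (by omega : (0:Int) < 3)]
        omega
      rw [solutionLoop, dif_pos hn]
      rw [ih _ _ hd]
      conv_rhs => rw [solution_alt]
      rw [dif_neg (by omega : ¬ n ≤ 0)]
      rw [String.append_assoc]
      congr 1
      have h0 : 0 ≤ PySem.Int.mod n 3 := PySem.Int.mod_nonneg n (by omega)
      have h3 : PySem.Int.mod n 3 < 3 := PySem.Int.mod_lt n (by omega)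
      have hm : PySem.Int.mod n 3 = 0 ∨ PySem.Int.mod n 3 = 1 ∨ PySem.Int.mod n 3 = 2 := by omega
      rcases hm with hm | hm | hm <;> rw [hm] <;>
        simp [PySem.Str.pyGet?, PySem.List.pyGet?, PySem.List.pyIdx?, String.singleton]
    · rw [solutionLoop, solution_alt]
      rw [dif_neg hn, dif_pos (by omega : n ≤ 0)]
      rfl

-- ===== VERDICT (by name: the statement is the Claim_ definition above) =====
theorem solution_spec : Claim_equal_solution := by
  intro n _
  unfold Spec_solution solution
  simpa using loop_eq_alt n.toNat n "" le_rfl
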